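-- pv_equiv track=rewrite | github.com/MrBrantCode/unitest_baseline | mut_generate/mist_train_cf/cf_37007/solution.py | swap_translations
-- ===== SOURCE A (Python) =====
-- def swap_translations(translations):
--     swapped_translations = {}
--     french_to_english = {}
--
--     for english, french in translations.items():
--         if french in french_to_english:
--             french_to_english[french].append(english)
--         else:
--             french_to_english[french] = [english]
--
--     for french, english_list in french_to_english.items():
--         if len(english_list) > 1:
--             for i, english in enumerate(english_list):
--                 swapped_translations[french + '_' + str(i+1)] = english
--         else:
--             swapped_translations[french] = english_list[0]
--
--     return swapped_translations
-- ===== SOURCE B (Python) =====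
-- def swap_translations(translations):
--     # Recursive partition: repeatedly take the first remaining french value,
--     # collect its whole group, emit it (suffixed when ambiguous), drop it, repeat.
--     # No intermediate dict-of-lists is built.
--     out = {}
--     pending = list(translations.items())
--     while pending:
--         f0 = pending[0][1]
--         group = [e for e, f in pending if f == f0]
--         if len(group) > 1:
--             for i, e in enumerate(group):
--                 out[f0 + '_' + str(i + 1)] = e
--         else:
--             out[f0] = group[0]
--         pending = [(e, f) for e, f in pending if f != f0]
--     return out
-- ===== Notes on version B (the rewrite author's own statement) =====
-- stated objective: simpler
-- what changed: B replaces A's two-pass group-then-relabel (an intermediate dict of english lists, then a second dict pass with a nested enumerate loop) by a single worklist loop that repeatedly takes the first remaining french value, collects and emits its whole group at once, and filters it out of the worklist, building no intermediate dict.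
import Mathlib
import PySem

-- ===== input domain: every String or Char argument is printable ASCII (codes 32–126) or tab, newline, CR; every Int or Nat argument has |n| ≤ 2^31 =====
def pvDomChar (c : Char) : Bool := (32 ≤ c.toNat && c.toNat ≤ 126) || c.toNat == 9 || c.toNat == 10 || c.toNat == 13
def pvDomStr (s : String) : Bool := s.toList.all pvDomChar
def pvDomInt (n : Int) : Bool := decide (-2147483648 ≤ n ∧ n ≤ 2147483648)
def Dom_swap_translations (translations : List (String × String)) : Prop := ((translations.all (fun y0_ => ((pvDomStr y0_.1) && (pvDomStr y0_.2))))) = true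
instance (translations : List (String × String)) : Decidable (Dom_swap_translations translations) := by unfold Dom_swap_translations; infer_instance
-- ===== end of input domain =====

-- B replaces A's two-pass group-then-relabel (intermediate dict of english lists, then a second
-- dict pass) by a worklist loop: take the first remaining french value, emit its whole group,
-- filter it out, repeat — no intermediate dict. Objective: simpler (no speed claim).

-- ===== PORT A =====
-- A pass 2: emit one (french, english_list) group into the output dict
-- (english_list[0] on the always-nonempty group list is ported as pyGetD _ 0 "").
def swapEmitA (out : PySem.Dict String String) (q : String × List String) :
    PySem.Dict String String :=
  if q.2.length > 1 then
    (PySem.List.enumerate q.2).foldl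
      (fun o ie => o.insert (q.1 ++ "_" ++ PySem.Int.toStr (ie.1 + 1)) ie.2) out
  else out.insert q.1 (PySem.List.pyGetD q.2 0 "")

def swap_translations (translations : List (String × String)) : List (String × String) :=
  -- for english, french in translations.items(): group englishes per french
  let french_to_english : PySem.Dict String (List String) :=
    translations.foldl
      (fun d p =>
        if d.contains p.2 then d.insert p.2 (d.getD p.2 [] ++ [p.1])
        else d.insert p.2 [p.1])
      PySem.Dict.empty
  -- for french, english_list in french_to_english.items(): emit (suffixed when ambiguous)
  let swapped := french_to_english.items.foldl swapEmitA PySem.Dict.empty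
  swapped.items

-- ===== PORT B =====
-- the while-loop of Source B: emit the first pending french's group, recurse on the rest
def swapGoB (pending : List (String × String)) (out : PySem.Dict String String) :
    PySem.Dict String String :=
  match pending with
  | [] => out
  | (e0, f0) :: rest =>
    let group := (((e0, f0) :: rest).filter (fun p => p.2 == f0)).map (·.1)
    let out' :=
      if group.length > 1 then
        (PySem.List.enumerate group).foldl
          (fun o ie => o.insert (f0 ++ "_" ++ PySem.Int.toStr (ie.1 + 1)) ie.2) out
      else out.insert f0 (PySem.List.pyGetD group 0 "")
    swapGoB (rest.filter (fun p => p.2 != f0)) out'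
termination_by pending.length
decreasing_by
  simp only [List.length_cons, List.length_unattach, Nat.lt_succ_iff]
  exact le_trans (List.length_filter_le _ _) (by simp)

def swap_translations_alt (translations : List (String × String)) : List (String × String) :=
  (swapGoB translations PySem.Dict.empty).items

-- ===== PRECONDITION & SPEC =====
def Spec_swap_translations (translations : List (String × String)) (out : List (String × String)) : Prop := out = swap_translations_alt translations
instance (translations : List (String × String)) (out : List (String × String)) : Decidable (Spec_swap_translations translations out) := by unfold Spec_swap_translations; infer_instance

-- ===== CLAIM (what is proved, stated in full; the proofs are below) =====
def Claim_equal_swap_translations : Prop := ∀ (translations : List (String × String)), Dom_swap_translations translations → Spec_swap_translations translations (swap_translations translations)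

-- ===== LEMMAS AND PROOFS =====

-- A's grouping step IS Dict.modify
lemma stepA_eq_modify :
    (fun (d : PySem.Dict String (List String)) (p : String × String) =>
        if d.contains p.2 then d.insert p.2 (d.getD p.2 [] ++ [p.1])
        else d.insert p.2 [p.1])
    = fun d p => d.modify p.2 [] (· ++ [p.1]) := by
  funext d p
  by_cases h : d.contains p.2
  · simp [h, PySem.Dict.modify]
  · simp only [Bool.not_eq_true] at h
    simp [h, PySem.Dict.modify, PySem.Dict.getD_of_not_contains _ _ h]

def groupA (l : List (String × String)) : PySem.Dict String (List String) :=
  l.foldl (fun d p => d.modify p.2 [] (· ++ [p.1])) PySem.Dict.empty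

lemma groupA_keys (l : List (String × String)) :
    (groupA l).keys = PySem.Set.ofList (l.map (·.2)) := by
  unfold groupA
  rw [PySem.Dict.keys_foldl_modify_key l (fun p => p.2) [] (fun _ p => (· ++ [p.1]))]
  simp [PySem.Set.update, PySem.Set.ofList_eq_foldl, PySem.Dict.keys_empty]

lemma groupA_nodup (l : List (String × String)) : (groupA l).keys.Nodup :=
  PySem.Dict.nodup_keys_foldl_modify_key l (fun p => p.2) [] (fun _ p => (· ++ [p.1])) _
    (by simp)

lemma groupA_getD (l : List (String × String)) (c : String) :
    (groupA l).getD c [] = (l.filter (fun p => p.2 == c)).map (·.1) := by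
  unfold groupA
  have : l.foldl (fun d p => d.modify p.2 [] (· ++ [p.1])) PySem.Dict.empty
      = (l.map (fun p => (p.2, p.1))).foldl
          (fun d p => d.modify p.1 [] (· ++ [p.2])) PySem.Dict.empty := by
    rw [List.foldl_map]
  rw [this, PySem.Dict.getD_foldl_modify_append]
  simp [PySem.Dict.getD_empty, List.filter_map, Function.comp_def]

lemma groupA_items (l : List (String × String)) :
    (groupA l).items
      = (PySem.Set.ofList (l.map (·.2))).map
          (fun f => (f, (l.filter (fun p => p.2 == f)).map (·.1))) := by
  rw [PySem.Dict.items_eq_map_keys _ (groupA_nodup l) [], groupA_keys]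
  exact List.map_congr_left (fun f _ => by rw [groupA_getD])

-- Set.ofList peels off its head together with all later duplicates of it
lemma setAdd_of_mem {α : Type} [BEq α] [LawfulBEq α] (s : List α) (x : α) (h : x ∈ s) :
    PySem.Set.add s x = s := by
  simp only [PySem.Set.add, PySem.Set.contains]
  rw [if_pos (by simpa using h)]

lemma setAdd_of_not_mem {α : Type} [BEq α] [LawfulBEq α] (s : List α) (x : α) (h : x ∉ s) :
    PySem.Set.add s x = s ++ [x] := by
  simp only [PySem.Set.add, PySem.Set.contains]
  rw [if_neg (by simpa using h)]

lemma foldl_add_cons {α : Type} [BEq α] [LawfulBEq α] (ys : List α) (a : α) (s : List α)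
    (h : a ∉ ys) : ys.foldl PySem.Set.add (a :: s) = a :: ys.foldl PySem.Set.add s := by
  induction ys generalizing s with
  | nil => rfl
  | cons x t ih =>
    simp only [List.mem_cons, not_or] at h
    simp only [List.foldl_cons]
    by_cases hx : x ∈ s
    · rw [setAdd_of_mem _ _ (List.mem_cons_of_mem a hx), setAdd_of_mem _ _ hx]
      exact ih _ h.2
    · have hxa : x ∉ (a :: s) := by
        simp only [List.mem_cons, not_or]
        exact ⟨fun he => h.1 he.symm, hx⟩
      rw [setAdd_of_not_mem _ _ hxa, setAdd_of_not_mem _ _ hx, List.cons_append]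
      exact ih _ h.2

lemma foldl_add_filter {α : Type} [BEq α] [LawfulBEq α] (xs : List α) (a : α) (s : List α)
    (h : a ∈ s) : xs.foldl PySem.Set.add s = (xs.filter (· != a)).foldl PySem.Set.add s := by
  induction xs generalizing s with
  | nil => rfl
  | cons x t ih =>
    by_cases hx : x = a
    · subst hx
      simp only [List.filter_cons, bne_self_eq_false, List.foldl_cons, setAdd_of_mem _ _ h]
      exact ih _ h
    · have hxa : (x != a) = true := by simpa [bne_iff_ne] using hx
      simp only [List.filter_cons, hxa, if_true, List.foldl_cons]
      have ha : a ∈ PySem.Set.add s x := by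
        by_cases hxs : x ∈ s
        · rwa [setAdd_of_mem _ _ hxs]
        · rw [setAdd_of_not_mem _ _ hxs]; exact List.mem_append_left _ h
      exact ih _ ha

lemma ofList_cons_split {α : Type} [BEq α] [LawfulBEq α] (a : α) (xs : List α) :
    PySem.Set.ofList (a :: xs) = a :: PySem.Set.ofList (xs.filter (· != a)) := by
  rw [PySem.Set.ofList_eq_foldl, PySem.Set.ofList_eq_foldl, List.foldl_cons]
  have h1 : PySem.Set.add ([] : List α) a = [a] := setAdd_of_not_mem _ _ (by simp)
  rw [h1, foldl_add_filter xs a [a] (by simp)]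
  exact foldl_add_cons _ _ _ (by simp)

-- the main invariant: A's emit pass over the grouped items equals B's worklist loop
lemma emit_eq_go (n : Nat) : ∀ (l : List (String × String)) (out : PySem.Dict String String),
    l.length ≤ n → (groupA l).items.foldl swapEmitA out = swapGoB l out := by
  induction n with
  | zero =>
    intro l out h
    rw [Nat.le_zero, List.length_eq_zero_iff] at h
    subst h
    rw [swapGoB]
    rfl
  | succ n ih =>
    intro l out h
    match l with
    | [] => rw [swapGoB]; rfl
    | (e0, f0) :: rest =>
      rw [groupA_items]
      simp only [List.map_cons]
      rw [ofList_cons_split]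
      have hmapfilter :
          ((rest.filter (fun p => p.2 != f0)).map (fun p : String × String => p.2))
            = (rest.map (·.2)).filter (· != f0) := by
        rw [List.filter_map]; rfl
      have hfilter2 : ∀ f : String, (f != f0) = true →
          ((e0, f0) :: rest).filter (fun p => p.2 == f)
            = (rest.filter (fun p => p.2 != f0)).filter (fun p => p.2 == f) := by
        intro f hf
        rw [List.filter_filter]
        simp only [List.filter_cons]
        have : (f0 == f) = false := by
          simp only [bne_iff_ne, ne_eq] at hf
          simp [Ne.symm hf]
        rw [this]
        exact List.filter_congr (fun p _ => by
          by_cases hp : p.2 = f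
          · simp [hp, hf]
          · simp [hp])
      have htail :
          (PySem.Set.ofList ((rest.map (·.2)).filter (· != f0))).map
              (fun f => (f, (((e0, f0) :: rest).filter (fun p => p.2 == f)).map (·.1)))
            = (groupA (rest.filter (fun p => p.2 != f0))).items := by
        rw [groupA_items, hmapfilter]
        refine List.map_congr_left (fun f hf => ?_)
        have hf' : (f != f0) = true :=
          (List.mem_filter.1 ((PySem.Set.mem_ofList _ _).1 hf)).2
        rw [hfilter2 f hf']
      simp only [List.map_cons, List.foldl_cons, htail, swapEmitA]
      rw [swapGoB]
      exact ih _ _ (le_trans (List.length_filter_le _ _) (Nat.le_of_succ_le_succ h))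

-- ===== VERDICT (by name: the statement is the Claim_ definition above) =====
theorem swap_translations_spec : Claim_equal_swap_translations := by
  intro translations _
  unfold Spec_swap_translations swap_translations swap_translations_alt
  rw [stepA_eq_modify]
  exact congrArg PySem.Dict.items
    (emit_eq_go translations.length translations PySem.Dict.empty le_rfl)
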